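-- pv_equiv track=rewrite | github.com/CMU-SAFARI/Genome-on-Diet | ReproducibleEvaluation/SeedingEvaluation/kc-py1.py | MatchTwoHashTablles
-- ===== SOURCE A (Python) =====
-- def MatchTwoHashTablles(a, n, b, m):
-- 	freq1 = {}
-- 	freq2 = {}
-- 	result = 0
--
-- 	for element in a:
-- 		if element in freq1:
-- 			freq1[element] += 1
-- 		else:
-- 			freq1[element] = 1
--
-- 	for element in b:
-- 		if element in freq2:
-- 			freq2[element] += 1
-- 		else:
-- 			freq2[element] = 1
--
-- 	for key, value in freq1.items():
-- 		if key in freq2: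
-- 			result += min(value, freq2.get(key))
--
-- 	return result
-- ===== SOURCE B (Python) =====
-- def MatchTwoHashTablles(a, n, b, m):
-- 	x = sorted(a)
-- 	y = sorted(b)
-- 	i = 0
-- 	j = 0
-- 	result = 0
-- 	while i < len(x) and j < len(y):
-- 		if x[i] == y[j]:
-- 			result += 1
-- 			i += 1
-- 			j += 1
-- 		elif x[i] < y[j]:
-- 			i += 1
-- 		else:
-- 			j += 1
-- 	return result
-- ===== Notes on version B (the rewrite author's own statement) =====
-- stated objective: alternative
-- what changed: Replaces the two frequency dictionaries and the key-intersection sum of minimum counts with sorting both lists and counting matching pairs in a single two-pointer merge walk.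
import Mathlib
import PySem

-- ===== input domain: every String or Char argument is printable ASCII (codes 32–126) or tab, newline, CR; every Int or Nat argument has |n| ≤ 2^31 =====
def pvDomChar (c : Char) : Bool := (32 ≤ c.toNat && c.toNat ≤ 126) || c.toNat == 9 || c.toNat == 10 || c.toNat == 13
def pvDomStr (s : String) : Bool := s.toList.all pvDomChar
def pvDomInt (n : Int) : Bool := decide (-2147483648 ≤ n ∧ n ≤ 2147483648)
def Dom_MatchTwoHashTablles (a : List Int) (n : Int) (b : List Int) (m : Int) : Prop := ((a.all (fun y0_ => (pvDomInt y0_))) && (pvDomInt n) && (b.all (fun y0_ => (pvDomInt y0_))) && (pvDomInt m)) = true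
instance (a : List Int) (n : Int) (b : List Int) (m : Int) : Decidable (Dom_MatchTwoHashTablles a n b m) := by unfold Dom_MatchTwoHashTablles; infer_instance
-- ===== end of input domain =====

-- B replaces the two frequency dictionaries and the key-intersection sum of minimum counts
-- with sorting both lists and a two-pointer merge counting matching pairs (alternative algorithm, similar cost).

-- ===== PORT A =====
def MatchTwoHashTablles (a : List Int) (n : Int) (b : List Int) (m : Int) : Int :=
  let freq1 := a.foldl (fun d e => if d.contains e then d.insert e (d.getD e 0 + 1) else d.insert e 1) PySem.Dict.empty
  let freq2 := b.foldl (fun d e => if d.contains e then d.insert e (d.getD e 0 + 1) else d.insert e 1) PySem.Dict.empty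
  -- freq2.get(key): guarded by 'key in freq2', so getD with any default is exact here
  freq1.items.foldl (fun r kv => if freq2.contains kv.1 then r + min kv.2 (freq2.getD kv.1 0) else r) 0

-- ===== PORT B =====
-- the while loop over indices i, j of the two sorted lists, as recursion on their suffixes
def pvMergeCount : List Int → List Int → Int
  | [], _ => 0
  | _ :: _, [] => 0
  | x :: xs, y :: ys =>
    if x = y then 1 + pvMergeCount xs ys
    else if x < y then pvMergeCount xs (y :: ys)
    else pvMergeCount (x :: xs) ys
termination_by xs ys => xs.length + ys.length

def MatchTwoHashTablles_alt (a : List Int) (n : Int) (b : List Int) (m : Int) : Int :=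
  pvMergeCount (PySem.List.sorted a (fun v => v)) (PySem.List.sorted b (fun v => v))

-- ===== PRECONDITION & SPEC =====
def Spec_MatchTwoHashTablles (a : List Int) (n : Int) (b : List Int) (m : Int) (out : Int) : Prop := out = MatchTwoHashTablles_alt a n b m
instance (a : List Int) (n : Int) (b : List Int) (m : Int) (out : Int) : Decidable (Spec_MatchTwoHashTablles a n b m out) := by unfold Spec_MatchTwoHashTablles; infer_instance

-- ===== CLAIM (what is proved, stated in full; the proofs are below) =====
def Claim_equal_MatchTwoHashTablles : Prop := ∀ (a : List Int) (n : Int) (b : List Int) (m : Int), Dom_MatchTwoHashTablles a n b m → Spec_MatchTwoHashTablles a n b m (MatchTwoHashTablles a n b m)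

-- ===== LEMMAS AND PROOFS =====

-- A's branched counting loop builds exactly Counter(l)
theorem pvCountFold_eq (l : List Int) :
    l.foldl (fun d e => if d.contains e then d.insert e (d.getD e 0 + 1) else d.insert e 1) PySem.Dict.empty
      = PySem.Dict.counter l := by
  rw [← PySem.Dict.foldl_insert_getD_add_one_eq_counter]
  apply PySem.List.foldl_congr_mem
  intro acc x _
  by_cases h : acc.contains x
  · simp [h]
  · simp [h, PySem.Dict.getD_of_not_contains acc 0 (by simpa using h)]

-- A computes Σ_{k ∈ dedup a} min(count a k, count b k)
theorem pvA_eq_sum (a : List Int) (n : Int) (b : List Int) (m : Int) :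
    MatchTwoHashTablles a n b m
      = ((PySem.Set.ofList a).map (fun k => (min (a.count k) (b.count k) : Int))).sum := by
  unfold MatchTwoHashTablles
  simp only [pvCountFold_eq, PySem.Dict.items_counter]
  rw [PySem.List.foldl_congr_mem _ _
      (fun r kv => r + (if (PySem.Dict.counter b).contains kv.1 then min kv.2 ((PySem.Dict.counter b).getD kv.1 0) else 0)) _
      (by intro acc kv _; by_cases h : (PySem.Dict.counter b).contains kv.1 <;> simp [h])]
  rw [PySem.List.foldl_add]
  simp only [List.map_map, zero_add]
  congr 1
  apply List.map_congr_left
  intro k hk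
  simp only [Function.comp]
  rw [PySem.Dict.contains_counter, PySem.Dict.getD_counter]
  by_cases h : k ∈ b
  · simp [h]
  · simp [h, List.count_eq_zero_of_not_mem h]

-- the merge walk on two ≤-sorted lists counts the multiset intersection
theorem pvMergeCount_eq_card (xs ys : List Int)
    (hx : xs.Pairwise (· ≤ ·)) (hy : ys.Pairwise (· ≤ ·)) :
    pvMergeCount xs ys = ((Multiset.ofList xs) ∩ (Multiset.ofList ys)).card := by
  fun_induction pvMergeCount xs ys with
  | case1 ys => simp
  | case2 x xs => simp
  | case3 xs x ys ih =>
    rw [show (Multiset.ofList (x :: xs)) = x ::ₘ Multiset.ofList xs from rfl,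
        show (Multiset.ofList (x :: ys)) = x ::ₘ Multiset.ofList ys from rfl,
        Multiset.cons_inter_of_pos _ (Multiset.mem_cons_self x _)]
    simp only [Multiset.erase_cons_head, Multiset.card_cons]
    rw [ih (hx.sublist (List.sublist_cons_self x xs)) (hy.sublist (List.sublist_cons_self x ys))]
    push_cast; ring
  | case4 x xs y ys hne hlt ih =>
    have hnm : x ∉ Multiset.ofList (y :: ys) := by
      simp only [Multiset.mem_coe, List.mem_cons]
      rintro (rfl | hmem)
      · exact hne rfl
      · exact absurd (List.rel_of_pairwise_cons hy hmem) (by omega)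
    rw [show (Multiset.ofList (x :: xs)) = x ::ₘ Multiset.ofList xs from rfl,
        Multiset.cons_inter_of_neg _ hnm]
    exact ih (hx.sublist (List.sublist_cons_self x xs)) hy
  | case5 x xs y ys hne hge ih =>
    have hyx : y < x := by
      rcases lt_trichotomy x y with h | h | h
      · exact absurd h hge
      · exact absurd h hne
      · exact h
    have hnm : y ∉ Multiset.ofList (x :: xs) := by
      simp only [Multiset.mem_coe, List.mem_cons]
      rintro (rfl | hmem)
      · exact absurd rfl hne
      · exact absurd (List.rel_of_pairwise_cons hx hmem) (by omega)
    rw [show (Multiset.ofList (y :: ys)) = y ::ₘ Multiset.ofList ys from rfl,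
        Multiset.inter_comm, Multiset.cons_inter_of_neg _ hnm, Multiset.inter_comm]
    exact ih hx (hy.sublist (List.sublist_cons_self y ys))

-- the sum of minimum counts over the distinct elements of a is the intersection cardinality
theorem pvSum_eq_card (a b : List Int) :
    (((PySem.Set.ofList a).map (fun k => min (a.count k) (b.count k))).sum : Nat)
      = ((Multiset.ofList a) ∩ (Multiset.ofList b)).card := by
  rw [← Multiset.toFinset_sum_count_eq]
  rw [← List.sum_toFinset _ (PySem.Set.nodup_ofList a)]
  have hfin : (PySem.Set.ofList a).toFinset = a.toFinset := by
    apply Finset.ext; intro k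
    simp [List.mem_toFinset, PySem.Set.mem_ofList]
  rw [hfin]
  have hsub : ((Multiset.ofList a) ∩ (Multiset.ofList b)).toFinset ⊆ a.toFinset := by
    intro k hk
    rw [Multiset.mem_toFinset, Multiset.mem_inter] at hk
    simpa [List.mem_toFinset] using hk.1
  rw [Finset.sum_subset hsub
      (fun k _ hk => Multiset.count_eq_zero.2 (fun hm => hk (Multiset.mem_toFinset.2 hm)))]
  apply Finset.sum_congr rfl
  intro k _
  rw [Multiset.count_inter]
  simp

-- ===== VERDICT (by name: the statement is the Claim_ definition above) =====
theorem MatchTwoHashTablles_spec : Claim_equal_MatchTwoHashTablles := by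
  intro a n b m _
  unfold Spec_MatchTwoHashTablles MatchTwoHashTablles_alt
  rw [pvA_eq_sum,
      pvMergeCount_eq_card _ _ (PySem.List.sorted_pairwise a (fun v => v))
        (PySem.List.sorted_pairwise b (fun v => v)),
      Multiset.coe_eq_coe.2 (PySem.List.sorted_perm a (fun v => v) false),
      Multiset.coe_eq_coe.2 (PySem.List.sorted_perm b (fun v => v) false),
      ← pvSum_eq_card a b]
  simp [List.map_map, Function.comp_def, Nat.cast_min]
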